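-- pv_equiv track=rewrite | github.com/resumetozero/multi-model-med-sight-via-reasoning | data/raw_input/docs_upload.py | extract_report_metadata
-- ===== SOURCE A (Python) =====
-- def extract_report_metadata(text: str) -> dict:
--     """Infer modality, anatomy, and summary from free-text report content."""
--     t = text.lower()
--     meta = {"modality": "Unknown", "anatomy": "General", "summary": ""}
--
--     # Modality detection
--     if any(x in t for x in ["computed tomography", " ct ", "ct scan", "ct:"]):
--         meta["modality"] = "CT"
--     elif any(x in t for x in ["magnetic resonance", " mri ", "mri:", "nmr"]):
--         meta["modality"] = "MRI"
--     elif any(x in t for x in ["x-ray", "radiograph", "chest pa", "ap view"]):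
--         meta["modality"] = "X-ray"
--     elif any(x in t for x in ["ultrasound", "sonography", "echography", " us "]):
--         meta["modality"] = "Ultrasound"
--     elif any(x in t for x in ["pet scan", "positron emission", "nuclear medicine"]):
--         meta["modality"] = "PET"
--     elif any(x in t for x in ["histopathology", "biopsy", "cytology", "pathology"]):
--         meta["modality"] = "Pathology"
--
--     # Anatomy detection
--     if any(x in t for x in ["chest", "lung", "pulmonary", "pleural", "thorax",
--                               "bronchi", "trachea", "cardiac", "heart"]):
--         meta["anatomy"] = "Chest"
--     elif any(x in t for x in ["brain", "cerebral", "cranial", "skull", "head",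
--                                 "intracranial", "meninges", "ventricle"]):
--         meta["anatomy"] = "Head"
--     elif any(x in t for x in ["abdomen", "liver", "hepatic", "renal", "kidney",
--                                 "spleen", "pancreas", "gallbladder", "pelvis",
--                                 "bowel", "colon", "rectum"]):
--         meta["anatomy"] = "Abdomen"
--     elif any(x in t for x in ["spine", "vertebr", "disc", "lumbar", "cervical",
--                                 "bone", "fracture", "joint", "femur", "tibia",
--                                 "humer", "shoulder", "knee", "hip"]):
--         meta["anatomy"] = "Musculoskeletal"
--     elif any(x in t for x in ["breast", "mammograph"]):
--         meta["anatomy"] = "Breast"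
--     elif any(x in t for x in ["prostate", "uterus", "ovarian", "testicular"]):
--         meta["anatomy"] = "Pelvis"
--
--     # Crude summary: first meaningful line
--     for line in text.splitlines():
--         stripped = line.strip()
--         if len(stripped) > 20:
--             meta["summary"] = stripped[:200]
--             break
--
--     return meta
-- ===== SOURCE B (Python) =====
-- # Different strategy: instead of an ordered elif cascade with early exit, flatten
-- # every keyword into one table with a numeric priority, collect ALL matching
-- # keywords in one pass, and take the minimum-priority label; the summary is built
-- # by staged passes (strip all lines, filter the long ones, take the head).
--
-- _MODALITY_TABLE = [
--     ("computed tomography", 0, "CT"), (" ct ", 0, "CT"), ("ct scan", 0, "CT"), ("ct:", 0, "CT"),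
--     ("magnetic resonance", 1, "MRI"), (" mri ", 1, "MRI"), ("mri:", 1, "MRI"), ("nmr", 1, "MRI"),
--     ("x-ray", 2, "X-ray"), ("radiograph", 2, "X-ray"), ("chest pa", 2, "X-ray"), ("ap view", 2, "X-ray"),
--     ("ultrasound", 3, "Ultrasound"), ("sonography", 3, "Ultrasound"), ("echography", 3, "Ultrasound"), (" us ", 3, "Ultrasound"),
--     ("pet scan", 4, "PET"), ("positron emission", 4, "PET"), ("nuclear medicine", 4, "PET"),
--     ("histopathology", 5, "Pathology"), ("biopsy", 5, "Pathology"), ("cytology", 5, "Pathology"), ("pathology", 5, "Pathology"),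
-- ]
--
-- _ANATOMY_TABLE = [
--     ("chest", 0, "Chest"), ("lung", 0, "Chest"), ("pulmonary", 0, "Chest"), ("pleural", 0, "Chest"),
--     ("thorax", 0, "Chest"), ("bronchi", 0, "Chest"), ("trachea", 0, "Chest"), ("cardiac", 0, "Chest"), ("heart", 0, "Chest"),
--     ("brain", 1, "Head"), ("cerebral", 1, "Head"), ("cranial", 1, "Head"), ("skull", 1, "Head"),
--     ("head", 1, "Head"), ("intracranial", 1, "Head"), ("meninges", 1, "Head"), ("ventricle", 1, "Head"),
--     ("abdomen", 2, "Abdomen"), ("liver", 2, "Abdomen"), ("hepatic", 2, "Abdomen"), ("renal", 2, "Abdomen"),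
--     ("kidney", 2, "Abdomen"), ("spleen", 2, "Abdomen"), ("pancreas", 2, "Abdomen"), ("gallbladder", 2, "Abdomen"),
--     ("pelvis", 2, "Abdomen"), ("bowel", 2, "Abdomen"), ("colon", 2, "Abdomen"), ("rectum", 2, "Abdomen"),
--     ("spine", 3, "Musculoskeletal"), ("vertebr", 3, "Musculoskeletal"), ("disc", 3, "Musculoskeletal"),
--     ("lumbar", 3, "Musculoskeletal"), ("cervical", 3, "Musculoskeletal"), ("bone", 3, "Musculoskeletal"),
--     ("fracture", 3, "Musculoskeletal"), ("joint", 3, "Musculoskeletal"), ("femur", 3, "Musculoskeletal"),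
--     ("tibia", 3, "Musculoskeletal"), ("humer", 3, "Musculoskeletal"), ("shoulder", 3, "Musculoskeletal"),
--     ("knee", 3, "Musculoskeletal"), ("hip", 3, "Musculoskeletal"),
--     ("breast", 4, "Breast"), ("mammograph", 4, "Breast"),
--     ("prostate", 5, "Pelvis"), ("uterus", 5, "Pelvis"), ("ovarian", 5, "Pelvis"), ("testicular", 5, "Pelvis"),
-- ]
--
--
-- def _best(t, table, default):
--     hits = [(p, label) for kw, p, label in table if kw in t]
--     return min(hits)[1] if hits else default
--
--
-- def extract_report_metadata(text: str) -> dict: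
--     """Infer modality, anatomy, and summary from free-text report content."""
--     t = text.lower()
--     candidates = [s for s in (line.strip() for line in text.splitlines()) if len(s) > 20]
--     return {
--         "modality": _best(t, _MODALITY_TABLE, "Unknown"),
--         "anatomy": _best(t, _ANATOMY_TABLE, "General"),
--         "summary": candidates[0][:200] if candidates else "",
--     }
-- ===== Notes on version B (the rewrite author's own statement) =====
-- stated objective: alternative
-- what changed: Replaces the ordered elif cascades (first matching group wins, early exit) by a flat keyword table with numeric priorities scanned in full, collecting every matching keyword and taking the minimum-priority label, and builds the summary by staged map/filter/head passes instead of a break loop.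
import Mathlib
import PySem

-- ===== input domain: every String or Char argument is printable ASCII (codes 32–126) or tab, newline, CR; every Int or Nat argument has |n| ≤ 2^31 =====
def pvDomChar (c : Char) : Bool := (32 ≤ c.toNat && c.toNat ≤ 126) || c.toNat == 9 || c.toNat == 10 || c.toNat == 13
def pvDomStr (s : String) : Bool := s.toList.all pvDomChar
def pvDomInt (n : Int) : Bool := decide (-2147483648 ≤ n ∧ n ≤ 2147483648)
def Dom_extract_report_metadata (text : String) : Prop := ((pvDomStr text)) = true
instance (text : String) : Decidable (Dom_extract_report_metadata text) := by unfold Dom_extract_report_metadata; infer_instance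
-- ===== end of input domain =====

-- B replaces A's early-exit elif cascades by a full scan of a flat prioritised keyword
-- table taking the minimum-priority match, and staged passes for the summary (alternative).

-- ===== PORT A =====
-- the 'for line in text.splitlines(): … break' summary loop, threading the dict
def erSummaryLoop (lines : List String) (md : PySem.Dict String String) : PySem.Dict String String :=
  match lines with
  | [] => md
  | line :: rest =>
    let stripped := PySem.Str.strip line
    if 20 < PySem.Str.len stripped then
      md.insert "summary" (PySem.Str.slice stripped none (some 200))
    else erSummaryLoop rest md

def extract_report_metadata (text : String) : List (String × String) :=
  let t := PySem.Str.lower text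
  let md : PySem.Dict String String :=
    PySem.Dict.ofList [("modality", "Unknown"), ("anatomy", "General"), ("summary", "")]
  let md :=
    if ["computed tomography", " ct ", "ct scan", "ct:"].any (fun x => PySem.Str.isIn x t) then
      md.insert "modality" "CT"
    else if ["magnetic resonance", " mri ", "mri:", "nmr"].any (fun x => PySem.Str.isIn x t) then
      md.insert "modality" "MRI"
    else if ["x-ray", "radiograph", "chest pa", "ap view"].any (fun x => PySem.Str.isIn x t) then
      md.insert "modality" "X-ray"
    else if ["ultrasound", "sonography", "echography", " us "].any (fun x => PySem.Str.isIn x t) then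
      md.insert "modality" "Ultrasound"
    else if ["pet scan", "positron emission", "nuclear medicine"].any (fun x => PySem.Str.isIn x t) then
      md.insert "modality" "PET"
    else if ["histopathology", "biopsy", "cytology", "pathology"].any (fun x => PySem.Str.isIn x t) then
      md.insert "modality" "Pathology"
    else md
  let md :=
    if ["chest", "lung", "pulmonary", "pleural", "thorax",
        "bronchi", "trachea", "cardiac", "heart"].any (fun x => PySem.Str.isIn x t) then
      md.insert "anatomy" "Chest"
    else if ["brain", "cerebral", "cranial", "skull", "head",
             "intracranial", "meninges", "ventricle"].any (fun x => PySem.Str.isIn x t) then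
      md.insert "anatomy" "Head"
    else if ["abdomen", "liver", "hepatic", "renal", "kidney",
             "spleen", "pancreas", "gallbladder", "pelvis",
             "bowel", "colon", "rectum"].any (fun x => PySem.Str.isIn x t) then
      md.insert "anatomy" "Abdomen"
    else if ["spine", "vertebr", "disc", "lumbar", "cervical",
             "bone", "fracture", "joint", "femur", "tibia",
             "humer", "shoulder", "knee", "hip"].any (fun x => PySem.Str.isIn x t) then
      md.insert "anatomy" "Musculoskeletal"
    else if ["breast", "mammograph"].any (fun x => PySem.Str.isIn x t) then
      md.insert "anatomy" "Breast"
    else if ["prostate", "uterus", "ovarian", "testicular"].any (fun x => PySem.Str.isIn x t) then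
      md.insert "anatomy" "Pelvis"
    else md
  (erSummaryLoop (PySem.Str.splitlines text) md).items

-- ===== PORT B =====
def erModalityTable : List (String × Int × String) :=
  [("computed tomography", 0, "CT"), (" ct ", 0, "CT"), ("ct scan", 0, "CT"), ("ct:", 0, "CT"),
   ("magnetic resonance", 1, "MRI"), (" mri ", 1, "MRI"), ("mri:", 1, "MRI"), ("nmr", 1, "MRI"),
   ("x-ray", 2, "X-ray"), ("radiograph", 2, "X-ray"), ("chest pa", 2, "X-ray"), ("ap view", 2, "X-ray"),
   ("ultrasound", 3, "Ultrasound"), ("sonography", 3, "Ultrasound"), ("echography", 3, "Ultrasound"), (" us ", 3, "Ultrasound"),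
   ("pet scan", 4, "PET"), ("positron emission", 4, "PET"), ("nuclear medicine", 4, "PET"),
   ("histopathology", 5, "Pathology"), ("biopsy", 5, "Pathology"), ("cytology", 5, "Pathology"), ("pathology", 5, "Pathology")]

def erAnatomyTable : List (String × Int × String) :=
  [("chest", 0, "Chest"), ("lung", 0, "Chest"), ("pulmonary", 0, "Chest"), ("pleural", 0, "Chest"),
   ("thorax", 0, "Chest"), ("bronchi", 0, "Chest"), ("trachea", 0, "Chest"), ("cardiac", 0, "Chest"), ("heart", 0, "Chest"),
   ("brain", 1, "Head"), ("cerebral", 1, "Head"), ("cranial", 1, "Head"), ("skull", 1, "Head"),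
   ("head", 1, "Head"), ("intracranial", 1, "Head"), ("meninges", 1, "Head"), ("ventricle", 1, "Head"),
   ("abdomen", 2, "Abdomen"), ("liver", 2, "Abdomen"), ("hepatic", 2, "Abdomen"), ("renal", 2, "Abdomen"),
   ("kidney", 2, "Abdomen"), ("spleen", 2, "Abdomen"), ("pancreas", 2, "Abdomen"), ("gallbladder", 2, "Abdomen"),
   ("pelvis", 2, "Abdomen"), ("bowel", 2, "Abdomen"), ("colon", 2, "Abdomen"), ("rectum", 2, "Abdomen"),
   ("spine", 3, "Musculoskeletal"), ("vertebr", 3, "Musculoskeletal"), ("disc", 3, "Musculoskeletal"),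
   ("lumbar", 3, "Musculoskeletal"), ("cervical", 3, "Musculoskeletal"), ("bone", 3, "Musculoskeletal"),
   ("fracture", 3, "Musculoskeletal"), ("joint", 3, "Musculoskeletal"), ("femur", 3, "Musculoskeletal"),
   ("tibia", 3, "Musculoskeletal"), ("humer", 3, "Musculoskeletal"), ("shoulder", 3, "Musculoskeletal"),
   ("knee", 3, "Musculoskeletal"), ("hip", 3, "Musculoskeletal"),
   ("breast", 4, "Breast"), ("mammograph", 4, "Breast"),
   ("prostate", 5, "Pelvis"), ("uterus", 5, "Pelvis"), ("ovarian", 5, "Pelvis"), ("testicular", 5, "Pelvis")]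

-- Python's tuple '<' on (int, str): lexicographic, strict
def erPairLt (y m : Int × String) : Bool :=
  decide (y.1 < m.1) || (decide (y.1 = m.1) && decide (y.2 < m.2))

-- Python's min over a nonempty list (first minimal element)
def erListMin (x : Int × String) (rest : List (Int × String)) : Int × String :=
  rest.foldl (fun m y => if erPairLt y m then y else m) x

def erBest (t : String) (table : List (String × Int × String)) (dflt : String) : String :=
  match (table.filter (fun e => PySem.Str.isIn e.1 t)).map (fun e => e.2) with
  | [] => dflt
  | h :: rest => (erListMin h rest).2

def extract_report_metadata_alt (text : String) : List (String × String) :=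
  let t := PySem.Str.lower text
  let candidates :=
    ((PySem.Str.splitlines text).map PySem.Str.strip).filter (fun s => 20 < PySem.Str.len s)
  [("modality", erBest t erModalityTable "Unknown"),
   ("anatomy", erBest t erAnatomyTable "General"),
   ("summary", match candidates with
               | [] => ""
               | c :: _ => PySem.Str.slice c none (some 200))]

-- ===== PRECONDITION & SPEC =====
def Spec_extract_report_metadata (text : String) (out : List (String × String)) : Prop := out = extract_report_metadata_alt text
instance (text : String) (out : List (String × String)) : Decidable (Spec_extract_report_metadata text out) := by unfold Spec_extract_report_metadata; infer_instance

-- ===== CLAIM (what is proved, stated in full; the proofs are below) =====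
def Claim_equal_extract_report_metadata : Prop := ∀ (text : String), Dom_extract_report_metadata text → Spec_extract_report_metadata text (extract_report_metadata text)

-- ===== LEMMAS AND PROOFS =====

-- A's grouped rule lists, as proof-side data
def erModalityGroups : List (List String × String) :=
  [(["computed tomography", " ct ", "ct scan", "ct:"], "CT"),
   (["magnetic resonance", " mri ", "mri:", "nmr"], "MRI"),
   (["x-ray", "radiograph", "chest pa", "ap view"], "X-ray"),
   (["ultrasound", "sonography", "echography", " us "], "Ultrasound"),
   (["pet scan", "positron emission", "nuclear medicine"], "PET"),
   (["histopathology", "biopsy", "cytology", "pathology"], "Pathology")]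

def erAnatomyGroups : List (List String × String) :=
  [(["chest", "lung", "pulmonary", "pleural", "thorax",
     "bronchi", "trachea", "cardiac", "heart"], "Chest"),
   (["brain", "cerebral", "cranial", "skull", "head",
     "intracranial", "meninges", "ventricle"], "Head"),
   (["abdomen", "liver", "hepatic", "renal", "kidney",
     "spleen", "pancreas", "gallbladder", "pelvis",
     "bowel", "colon", "rectum"], "Abdomen"),
   (["spine", "vertebr", "disc", "lumbar", "cervical",
     "bone", "fracture", "joint", "femur", "tibia",
     "humer", "shoulder", "knee", "hip"], "Musculoskeletal"),
   (["breast", "mammograph"], "Breast"),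
   (["prostate", "uterus", "ovarian", "testicular"], "Pelvis")]

-- A's elif cascade as a recursion over the grouped rules
def erClassify (t : String) (rules : List (List String × String)) (dflt : String) : String :=
  match rules with
  | [] => dflt
  | (keywords, label) :: rest =>
    if keywords.any (fun k => PySem.Str.isIn k t) then label else erClassify t rest dflt

-- flatten grouped rules with priorities n, n+1, …
def erFlat (n : Int) : List (List String × String) → List (String × Int × String)
  | [] => []
  | (kws, lbl) :: rest => kws.map (fun k => (k, n, lbl)) ++ erFlat (n + 1) rest

lemma erFlat_fst_ge (n : Int) (rules : List (List String × String)) :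
    ∀ e ∈ erFlat n rules, n ≤ e.2.1 := by
  induction rules generalizing n with
  | nil => simp [erFlat]
  | cons r rest ih =>
    obtain ⟨kws, lbl⟩ := r
    intro e he
    simp only [erFlat, List.mem_append, List.mem_map] at he
    rcases he with ⟨k, _, rfl⟩ | h
    · exact le_refl n
    · exact le_trans (by omega) (ih (n + 1) e h)

lemma erListMin_of_no_beat (x : Int × String) (rest : List (Int × String))
    (h : ∀ y ∈ rest, erPairLt y x = false) : erListMin x rest = x := by
  induction rest with
  | nil => rfl
  | cons y ys ih =>
    simp only [erListMin, List.foldl_cons]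
    rw [h y (List.mem_cons_self ..)]
    exact ih (fun z hz => h z (List.mem_cons_of_mem _ hz))

lemma erPairLt_self_false (p : Int × String) : erPairLt p p = false := by
  simp [erPairLt]

-- main bridge: min over the flattened table = the cascade
lemma erBest_erFlat (t dflt : String) (rules : List (List String × String)) (n : Int) :
    erBest t (erFlat n rules) dflt = erClassify t rules dflt := by
  induction rules generalizing n with
  | nil => simp [erBest, erFlat, erClassify]
  | cons r rest ih =>
    obtain ⟨kws, lbl⟩ := r
    simp only [erClassify, erFlat]
    have hfilter : (kws.map (fun k => (k, n, lbl)) ++ erFlat (n + 1) rest).filter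
        (fun e => PySem.Str.isIn e.1 t)
      = (kws.filter (fun k => PySem.Str.isIn k t)).map (fun k => (k, n, lbl))
        ++ (erFlat (n + 1) rest).filter (fun e => PySem.Str.isIn e.1 t) := by
      rw [List.filter_append, List.filter_map]
      rfl
    by_cases hany : kws.any (fun k => PySem.Str.isIn k t) = true
    · rw [if_pos hany]
      obtain ⟨k0, hk0, hin⟩ := List.any_eq_true.mp hany
      have hne : kws.filter (fun k => PySem.Str.isIn k t) ≠ [] := by
        intro hnil
        exact absurd hin (by simpa using List.filter_eq_nil_iff.mp hnil k0 hk0)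
      obtain ⟨a, as, has⟩ := List.exists_cons_of_ne_nil hne
      simp only [erBest, hfilter, has, List.map_append, List.map_cons]
      have hbeat : ∀ y ∈ ((as.map (fun k => ((k : String), n, lbl))).map
              (fun e : String × Int × String => e.2))
            ++ ((erFlat (n + 1) rest).filter (fun e => PySem.Str.isIn e.1 t)).map
              (fun e : String × Int × String => e.2),
          erPairLt y (n, lbl) = false := by
        intro y hy
        rcases List.mem_append.mp hy with h | h
        · simp only [List.mem_map] at h
          obtain ⟨e, ⟨k, _, rfl⟩, rfl⟩ := h
          exact erPairLt_self_false _
        · obtain ⟨e, he, rfl⟩ := List.mem_map.mp h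
          have hge : n + 1 ≤ e.2.1 :=
            erFlat_fst_ge (n + 1) rest e (List.mem_filter.mp he).1
          simp only [erPairLt, Bool.or_eq_false_iff, Bool.and_eq_false_iff,
            decide_eq_false_iff_not]
          constructor
          · omega
          · left; omega
      exact congrArg Prod.snd (erListMin_of_no_beat _ _ hbeat)
    · rw [if_neg hany]
      have hnil : kws.filter (fun k => PySem.Str.isIn k t) = [] := by
        rw [List.filter_eq_nil_iff]
        intro k hk
        have := List.any_eq_false.mp (Bool.eq_false_iff.mpr hany) k hk
        simpa using this
      simp only [erBest, hfilter, hnil, List.map_nil, List.nil_append]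
      exact ih (n + 1)

lemma erModalityTable_eq : erModalityTable = erFlat 0 erModalityGroups := by
  simp [erModalityTable, erModalityGroups, erFlat]

lemma erAnatomyTable_eq : erAnatomyTable = erFlat 0 erAnatomyGroups := by
  simp [erAnatomyTable, erAnatomyGroups, erFlat]

-- A's elif cascade for one key, threading the dict (defeq to A's literal nested ifs)
def cascadeIns (t : String) (rules : List (List String × String)) (key : String)
    (d : PySem.Dict String String) : PySem.Dict String String :=
  match rules with
  | [] => d
  | (kws, label) :: rest =>
    if kws.any (fun x => PySem.Str.isIn x t) then d.insert key label
    else cascadeIns t rest key d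

lemma cascadeIns_items (t : String) (rules : List (List String × String)) (key : String)
    (d : PySem.Dict String String) (pre post : List (String × String)) (v : String)
    (hd : d.items = pre ++ (key, v) :: post)
    (hpre : ∀ p ∈ pre, p.1 ≠ key) (hpost : ∀ p ∈ post, p.1 ≠ key) :
    (cascadeIns t rules key d).items = pre ++ (key, erClassify t rules v) :: post := by
  induction rules with
  | nil => simpa [cascadeIns, erClassify] using hd
  | cons r rest ih =>
    obtain ⟨kws, label⟩ := r
    simp only [cascadeIns, erClassify]
    split
    · have hc : d.contains key = true := by
        rw [PySem.Dict.contains_iff_mem_keys]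
        simp [PySem.Dict.keys, hd]
      rw [PySem.Dict.items_insert_of_contains (h := hc), hd]
      have hmap : ∀ (l : List (String × String)), (∀ p ∈ l, p.1 ≠ key) →
          l.map (fun p => if p.1 == key then (key, label) else p) = l := by
        intro l hl
        calc l.map _ = l.map id := List.map_congr_left (fun p hp => by simp [hl p hp])
          _ = l := List.map_id _
      simp only [List.map_append, List.map_cons, BEq.rfl, if_pos, hmap pre hpre, hmap post hpost]
    · exact ih

-- B's staged summary, as what A's break loop computes
def erBSummary (lines : List String) : String :=
  match (lines.map PySem.Str.strip).filter (fun s => 20 < PySem.Str.len s) with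
  | [] => ""
  | c :: _ => PySem.Str.slice c none (some 200)

lemma erSummaryLoop_items (lines : List String) (d : PySem.Dict String String) (m a : String)
    (hd : d.items = [("modality", m), ("anatomy", a), ("summary", "")]) :
    (erSummaryLoop lines d).items
      = [("modality", m), ("anatomy", a), ("summary", erBSummary lines)] := by
  induction lines with
  | nil => simpa [erSummaryLoop, erBSummary] using hd
  | cons line rest ih =>
    simp only [erSummaryLoop, erBSummary, List.map_cons, List.filter_cons]
    split
    · next h =>
      rw [if_pos (by simpa using h)]
      simp [PySem.Dict.items_insert, PySem.Dict.contains, hd]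
    · next h =>
      rw [if_neg (by simpa using h)]
      exact ih

-- ===== VERDICT (by name: the statement is the Claim_ definition above) =====
theorem extract_report_metadata_spec : Claim_equal_extract_report_metadata := by
  intro text _
  show (erSummaryLoop (PySem.Str.splitlines text)
      (cascadeIns (PySem.Str.lower text) erAnatomyGroups "anatomy"
        (cascadeIns (PySem.Str.lower text) erModalityGroups "modality"
          (PySem.Dict.ofList [("modality", "Unknown"), ("anatomy", "General"), ("summary", "")])))).items
    = extract_report_metadata_alt text
  have h1 := cascadeIns_items (PySem.Str.lower text) erModalityGroups "modality"
    (PySem.Dict.ofList [("modality", "Unknown"), ("anatomy", "General"), ("summary", "")])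
    [] [("anatomy", "General"), ("summary", "")] "Unknown" rfl (by simp) (by decide)
  have h2 := cascadeIns_items (PySem.Str.lower text) erAnatomyGroups "anatomy" _
    [("modality", erClassify (PySem.Str.lower text) erModalityGroups "Unknown")] [("summary", "")]
    "General" h1 (by simp) (by decide)
  rw [erSummaryLoop_items _ _ _ _ h2]
  simp only [extract_report_metadata_alt, erModalityTable_eq, erAnatomyTable_eq,
    erBest_erFlat, erBSummary]
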